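-- pv_equiv track=rewrite | github.com/lijuli/leo-rning | 1_gen/final_a_closest_zero.py | find_distances_to_empty_spots
-- ===== SOURCE A (Python) =====
-- def find_distances_to_empty_spots(spots):
--     distances = [None] * len(spots)
--     empty_spot = -1
--     for index in range(len(spots)):
--         if spots[index] == '0':
--             empty_spot = index
--             distances[index] = 0
--             continue
--         if empty_spot == -1:
--             continue
--         distances[index] = abs(index - empty_spot)
--
--     for index in range(empty_spot - 1, -1, -1):
--         if spots[index] == '0':
--             empty_spot = index
--             continue
--         distance = abs(index - empty_spot)
--         if distances[index] is None or distance < distances[index]: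
--             distances[index] = distance
--     return distances
-- ===== SOURCE B (Python) =====
-- def find_distances_to_empty_spots(spots):
--     zeros = [i for i, c in enumerate(spots) if c == '0']
--     if not zeros:
--         return [None] * len(spots)
--     return [min(abs(i - z) for z in zeros) for i in range(len(spots))]
-- ===== Notes on version B (the rewrite author's own statement) =====
-- stated objective: simpler
-- what changed: Replaces A's two directional propagation passes over a mutable distances array by building the list of zero indices once and computing each entry as a minimum of distances to those indices.
import Mathlib
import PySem

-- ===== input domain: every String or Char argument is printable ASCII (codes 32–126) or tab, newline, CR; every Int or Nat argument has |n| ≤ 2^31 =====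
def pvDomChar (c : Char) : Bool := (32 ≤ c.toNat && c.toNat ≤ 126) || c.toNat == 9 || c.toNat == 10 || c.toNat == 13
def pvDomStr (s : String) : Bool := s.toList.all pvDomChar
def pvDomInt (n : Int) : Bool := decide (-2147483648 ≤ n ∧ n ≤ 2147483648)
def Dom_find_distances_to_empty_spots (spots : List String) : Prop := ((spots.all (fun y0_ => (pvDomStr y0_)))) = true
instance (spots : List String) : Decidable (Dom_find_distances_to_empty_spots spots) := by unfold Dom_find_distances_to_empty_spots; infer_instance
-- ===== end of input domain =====

-- B replaces A's two directional propagation passes over a mutable distances array by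
-- building the list of zero indices once and taking a minimum over it per position (objective: simpler).

-- ===== PORT A =====
-- body of A's first (forward) loop
def fwdStep (spots : List String) (st : List (Option Int) × Int) (index : Int) : List (Option Int) × Int :=
  if (PySem.List.pyGet? spots index).getD "" == "0" then
    (st.1.set index.toNat (some 0), index)
  else if st.2 == -1 then st
  else (st.1.set index.toNat (some (((index - st.2).natAbs : Int))), st.2)

-- body of A's second (backward) loop
def bwdStep (spots : List String) (st : List (Option Int) × Int) (index : Int) : List (Option Int) × Int :=
  if (PySem.List.pyGet? spots index).getD "" == "0" then
    (st.1, index)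
  else
    let distance : Int := ((index - st.2).natAbs : Int)
    match (PySem.List.pyGet? st.1 index).getD none with
    | none => (st.1.set index.toNat (some distance), st.2)
    | some v => if distance < v then (st.1.set index.toNat (some distance), st.2) else st

def find_distances_to_empty_spots (spots : List String) : List (Option Int) :=
  let distances : List (Option Int) := List.replicate spots.length none
  let st := (PySem.List.pyRange 0 (spots.length : Int) 1).foldl (fwdStep spots) (distances, -1)
  ((PySem.List.pyRange (st.2 - 1) (-1) (-1)).foldl (bwdStep spots) st).1

-- ===== PORT B =====
-- min() in Python B is applied only under the nonempty guard; min? is that min.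
def find_distances_to_empty_spots_alt (spots : List String) : List (Option Int) :=
  let zeros : List Int := (PySem.List.enumerate spots).filterMap (fun p => if p.2 == "0" then some p.1 else none)
  if zeros.isEmpty then List.replicate spots.length none
  else (PySem.List.pyRange 0 (spots.length : Int) 1).map
    (fun i => PySem.List.min? (zeros.map (fun z => ((i - z).natAbs : Int))) (fun x => x))

-- ===== PRECONDITION & SPEC =====
def Spec_find_distances_to_empty_spots (spots : List String) (out : List (Option Int)) : Prop := out = find_distances_to_empty_spots_alt spots
instance (spots : List String) (out : List (Option Int)) : Decidable (Spec_find_distances_to_empty_spots spots out) := by unfold Spec_find_distances_to_empty_spots; infer_instance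

-- ===== CLAIM (what is proved, stated in full; the proofs are below) =====
def Claim_equal_find_distances_to_empty_spots : Prop := ∀ (spots : List String), Dom_find_distances_to_empty_spots spots → Spec_find_distances_to_empty_spots spots (find_distances_to_empty_spots spots)

-- ===== LEMMAS AND PROOFS =====

-- proof-side vocabulary
def isZero (spots : List String) (i : Nat) : Bool := (spots[i]?).getD "" == "0"

-- index of the last '0' strictly below m
def lastZ (spots : List String) : Nat → Option Nat
  | 0 => none
  | m+1 => if isZero spots m then some m else lastZ spots m

-- value the forward pass leaves at k
def fwdVal (spots : List String) (k : Nat) : Option Int :=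
  (lastZ spots (k+1)).map (fun j => ((k : Int) - (j : Int)))

def zerosN (spots : List String) : List Nat :=
  (List.range spots.length).filter (fun i => isZero spots i)

-- distance to the nearest '0' (none iff there is no '0')
def nearVal (spots : List String) (k : Nat) : Option Int :=
  PySem.List.min? ((zerosN spots).map (fun (z : Nat) => (((k : Int) - (z : Int)).natAbs : Int))) (fun x => x)

theorem lastZ_succ (spots : List String) (m : Nat) :
    lastZ spots (m+1) = if isZero spots m then some m else lastZ spots m := rfl

theorem mem_zerosN (spots : List String) (z : Nat) :
    z ∈ zerosN spots ↔ z < spots.length ∧ isZero spots z = true := by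
  simp [zerosN, List.mem_filter, List.mem_range]

theorem min?_unique (xs : List Int) (x : Int) (hx : x ∈ xs) (hmin : ∀ y ∈ xs, x ≤ y) :
    PySem.List.min? xs (fun a => a) = some x := by
  cases h : PySem.List.min? xs (fun a => a) with
  | none =>
      rw [PySem.List.min?_eq_none_iff] at h
      subst h; cases hx
  | some m =>
      have h1 := PySem.List.min?_mem h
      have h2 := PySem.List.min?_id_le h x hx
      exact Option.some_inj.mpr (le_antisymm h2 (hmin m h1))

theorem min?_congr_mem (l1 l2 : List Int) (h : ∀ x, x ∈ l1 ↔ x ∈ l2) :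
    PySem.List.min? l1 (fun a => a) = PySem.List.min? l2 (fun a => a) := by
  cases h1 : PySem.List.min? l1 (fun a => a) with
  | none =>
      rw [PySem.List.min?_eq_none_iff] at h1
      subst h1
      cases h2 : PySem.List.min? l2 (fun a => a) with
      | none => rfl
      | some m => exact absurd ((h m).mpr (PySem.List.min?_mem h2)) (List.not_mem_nil)
  | some m =>
      have hm1 := PySem.List.min?_mem h1
      rw [min?_unique l2 m ((h m).mp hm1)
        (fun y hy => PySem.List.min?_id_le h1 y ((h y).mpr hy))]

theorem nearVal_eq_some (spots : List String) (k : Nat) (d : Int) (z : Nat)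
    (hz : z ∈ zerosN spots) (hd : d = (((k : Int) - (z : Int)).natAbs : Int))
    (hmin : ∀ z', z' < spots.length → isZero spots z' = true → d ≤ (((k : Int) - (z' : Int)).natAbs : Int)) :
    nearVal spots k = some d := by
  unfold nearVal
  apply min?_unique
  · exact List.mem_map.mpr ⟨z, hz, hd.symm⟩
  · intro y hy
    obtain ⟨z', hz', rfl⟩ := List.mem_map.mp hy
    obtain ⟨h1, h2⟩ := (mem_zerosN spots z').mp hz'
    exact hmin z' h1 h2

theorem nearVal_none (spots : List String) (k : Nat) (h : zerosN spots = []) :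
    nearVal spots k = none := by
  simp [nearVal, h, PySem.List.min?]

theorem lastZ_props (spots : List String) (m : Nat) (j : Nat) (h : lastZ spots m = some j) :
    isZero spots j = true ∧ j < m ∧ ∀ k, j < k → k < m → isZero spots k = false := by
  induction m with
  | zero => simp [lastZ] at h
  | succ m ih =>
      rw [lastZ_succ] at h
      by_cases hz : isZero spots m
      · rw [if_pos hz] at h
        obtain rfl : m = j := Option.some_inj.mp h
        exact ⟨hz, by omega, fun k h1 h2 => by omega⟩
      · rw [if_neg hz] at h
        obtain ⟨p1, p2, p3⟩ := ih h
        refine ⟨p1, by omega, fun k h1 h2 => ?_⟩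
        by_cases hk : k < m
        · exact p3 k h1 hk
        · have hkm : k = m := by omega
          subst hkm
          exact Bool.eq_false_iff.mpr hz

theorem lastZ_none (spots : List String) (m : Nat) (h : lastZ spots m = none) :
    ∀ k, k < m → isZero spots k = false := by
  induction m with
  | zero => intro k hk; omega
  | succ m ih =>
      rw [lastZ_succ] at h
      by_cases hz : isZero spots m
      · rw [if_pos hz] at h; cases h
      · rw [if_neg hz] at h
        intro k hk
        by_cases hkm : k < m
        · exact ih h k hkm
        · have hk' : k = m := by omega
          subst hk'
          exact Bool.eq_false_iff.mpr hz

theorem lastZ_intro (spots : List String) (m : Nat) (j : Nat)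
    (hz : isZero spots j = true) (hjm : j < m)
    (hgap : ∀ k, j < k → k < m → isZero spots k = false) :
    lastZ spots m = some j := by
  induction m with
  | zero => omega
  | succ m ih =>
      rw [lastZ_succ]
      by_cases hm : isZero spots m
      · rw [if_pos hm]
        have hjeq : j = m := by
          by_contra hne
          have := hgap m (by omega) (by omega)
          rw [this] at hm; cases hm
        rw [hjeq]
      · rw [if_neg hm]
        have hjm' : j < m := by
          by_contra hne
          have hje : j = m := by omega
          rw [hje] at hz
          rw [hz] at hm; exact hm rfl
        exact ih hjm' (fun k h1 h2 => hgap k h1 (by omega))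

theorem fwd_inv (spots : List String) (m : Nat) (hm : m ≤ spots.length) :
    ∃ dists : List (Option Int),
      (List.range m).foldl (fun (st : List (Option Int) × Int) (k : Nat) => fwdStep spots st (k : Int))
          (List.replicate spots.length none, -1)
        = (dists, match lastZ spots m with | none => (-1 : Int) | some j => (j : Int)) ∧
      dists.length = spots.length ∧
      (∀ k, k < m → dists[k]? = some (fwdVal spots k)) ∧
      (∀ k, m ≤ k → k < spots.length → dists[k]? = some none) := by
  induction m with
  | zero =>
      refine ⟨List.replicate spots.length none, rfl, by simp, ?_, ?_⟩
      · intro k hk; omega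
      · intro k _ hk2; simp [hk2]
  | succ m ih =>
      obtain ⟨dists, heq, hlen, hlt, hge⟩ := ih (by omega)
      have hmlen : m < spots.length := by omega
      rw [List.range_succ, List.foldl_append, heq, List.foldl_cons, List.foldl_nil]
      unfold fwdStep
      simp only [PySem.List.pyGet?_natCast, Int.toNat_natCast]
      by_cases hzm : isZero spots m
      · have hzm' : ((spots[m]?).getD "" == "0") = true := hzm
        rw [if_pos hzm']
        have hl1 : lastZ spots (m+1) = some m := by
          rw [lastZ_succ, if_pos hzm]
        refine ⟨dists.set m (some 0), ?_, by simp [hlen], ?_, ?_⟩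
        · rw [hl1]
        · intro k hk
          by_cases hkm : k = m
          · subst hkm
            rw [List.getElem?_set_self (by omega)]
            simp [fwdVal, hl1]
          · rw [List.getElem?_set_ne (fun hc => hkm hc.symm)]
            exact hlt k (by omega)
        · intro k h1 h2
          rw [List.getElem?_set_ne (by omega)]
          exact hge k (by omega) h2
      · have hzm' : ((spots[m]?).getD "" == "0") = false := Bool.eq_false_iff.mpr hzm
        rw [hzm']
        simp only [Bool.false_eq_true, if_false]
        have hl1 : lastZ spots (m+1) = lastZ spots m := by
          rw [lastZ_succ, if_neg hzm]
        cases hlj : lastZ spots m with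
        | none =>
            simp only [show ((-1 : Int) == -1) = true from rfl, if_true]
            refine ⟨dists, ?_, hlen, ?_, ?_⟩
            · rw [hl1, hlj]
            · intro k hk
              by_cases hkm : k = m
              · subst hkm
                rw [hge k (by omega) hmlen]
                simp [fwdVal, hl1, hlj]
              · exact hlt k (by omega)
            · intro k h1 h2; exact hge k (by omega) h2
        | some j =>
            obtain ⟨hjz, hjm, _⟩ := lastZ_props spots m j hlj
            have hne : ((j : Int) == -1) = false := by
              simp only [beq_eq_false_iff_ne, ne_eq]
              omega
            rw [hne]
            simp only [Bool.false_eq_true, if_false]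
            refine ⟨dists.set m (some (((m : Int) - (j : Int)).natAbs : Int)), ?_, by simp [hlen], ?_, ?_⟩
            · rw [hl1, hlj]
            · intro k hk
              by_cases hkm : k = m
              · subst hkm
                rw [List.getElem?_set_self (by omega)]
                simp [fwdVal, hl1, hlj]
                omega
              · rw [List.getElem?_set_ne (fun hc => hkm hc.symm)]
                exact hlt k (by omega)
            · intro k h1 h2
              rw [List.getElem?_set_ne (by omega)]
              exact hge k (by omega) h2

theorem bwd_step_inv (spots : List String) (i : Nat) (dists : List (Option Int)) (es : Nat)
    (hes : es < spots.length) (hz : isZero spots es = true) (hie : i < es)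
    (hgap : ∀ k, i < k → k < es → isZero spots k = false)
    (hlen : dists.length = spots.length)
    (hlow : ∀ k, k ≤ i → dists[k]? = some (fwdVal spots k))
    (hhigh : ∀ k, i < k → k < spots.length → dists[k]? = some (nearVal spots k)) :
    ∃ (dists' : List (Option Int)) (es' : Nat),
      bwdStep spots (dists, (es : Int)) (i : Int) = (dists', (es' : Int)) ∧
      dists'.length = spots.length ∧
      (∀ k, k < i → dists'[k]? = some (fwdVal spots k)) ∧
      (∀ k, i ≤ k → k < spots.length → dists'[k]? = some (nearVal spots k)) ∧
      es' < spots.length ∧ isZero spots es' = true ∧ i ≤ es' ∧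
      (∀ k, i ≤ k → k < es' → isZero spots k = false) := by
  have hilen : i < spots.length := by omega
  have hmemes : es ∈ zerosN spots := (mem_zerosN spots es).mpr ⟨hes, hz⟩
  unfold bwdStep
  simp only [PySem.List.pyGet?_natCast, Int.toNat_natCast]
  by_cases hzi : isZero spots i
  · have hzi' : ((spots[i]?).getD "" == "0") = true := hzi
    rw [if_pos hzi']
    refine ⟨dists, i, rfl, hlen, fun k hk => hlow k (by omega), ?_, hilen, hzi, le_rfl,
      fun k h1 h2 => by omega⟩
    intro k h1 h2
    by_cases hki : k = i
    · subst hki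
      rw [hlow k le_rfl]
      have hl : lastZ spots (k+1) = some k := by rw [lastZ_succ, if_pos hzi]
      have hnear : nearVal spots k = some ((((k : Int) - (k : Int)).natAbs : Int)) := by
        apply nearVal_eq_some spots k _ k ((mem_zerosN spots k).mpr ⟨h2, hzi⟩) rfl
        intro z' _ _
        omega
      rw [hnear]
      simp [fwdVal, hl]
    · exact hhigh k (by omega) h2
  · have hzi' : ((spots[i]?).getD "" == "0") = false := Bool.eq_false_iff.mpr hzi
    rw [hzi']
    simp only [Bool.false_eq_true, if_false]
    have hcur : dists[i]?.getD none = fwdVal spots i := by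
      rw [hlow i le_rfl]; rfl
    have hlz1 : lastZ spots (i+1) = lastZ spots i := by
      rw [lastZ_succ, if_neg hzi]
    -- any zero strictly above i is at least es
    have habove : ∀ z', z' < spots.length → isZero spots z' = true → i < z' → es ≤ z' := by
      intro z' _ hzz' hi'
      by_contra hc
      have := hgap z' hi' (by omega)
      rw [this] at hzz'; cases hzz'
    cases hlj : lastZ spots i with
    | none =>
        have hnone : fwdVal spots i = none := by simp [fwdVal, hlz1, hlj]
        simp only [hcur, hnone]
        have hnolow : ∀ z', isZero spots z' = true → i < z' := by
          intro z' hzz'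
          by_contra hc
          have := lastZ_none spots (i+1) (by rw [hlz1, hlj]) z' (by omega)
          rw [this] at hzz'; cases hzz'
        have hnear : nearVal spots i = some ((((i : Int) - (es : Int)).natAbs : Int)) := by
          apply nearVal_eq_some spots i _ es hmemes rfl
          intro z' hl1 hl2
          have h1 := hnolow z' hl2
          have h2 := habove z' hl1 hl2 h1
          omega
        refine ⟨dists.set i (some ((((i : Int) - (es : Int)).natAbs : Int))), es, rfl,
          by simp [hlen], ?_, ?_, hes, hz, by omega, ?_⟩
        · intro k hk
          rw [List.getElem?_set_ne (by omega)]
          exact hlow k (by omega)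
        · intro k h1 h2
          by_cases hki : k = i
          · subst hki
            rw [List.getElem?_set_self (by omega), hnear]
          · rw [List.getElem?_set_ne (fun hc => hki hc.symm)]
            exact hhigh k (by omega) h2
        · intro k h1 h2
          by_cases hki : k = i
          · subst hki; exact Bool.eq_false_iff.mpr hzi
          · exact hgap k (by omega) h2
    | some j =>
        obtain ⟨hjz, hji, hjgap⟩ := lastZ_props spots i j hlj
        have hjmem : j ∈ zerosN spots := (mem_zerosN spots j).mpr ⟨by omega, hjz⟩
        have hsomev : fwdVal spots i = some ((i : Int) - (j : Int)) := by
          simp [fwdVal, hlz1, hlj]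
        simp only [hcur, hsomev]
        -- any zero at most i is at most j
        have hbelow : ∀ z', isZero spots z' = true → z' ≤ i → z' ≤ j := by
          intro z' hzz' hle
          by_contra hc
          have hz'i : z' < i := by
            by_contra hc2
            have hzeq : z' = i := by omega
            rw [hzeq] at hzz'
            rw [hzz'] at hzi; exact hzi rfl
          have := hjgap z' (by omega) hz'i
          rw [this] at hzz'; cases hzz'
        by_cases hc : ((((i : Int) - (es : Int)).natAbs : Int)) < (i : Int) - (j : Int)
        · rw [if_pos hc]
          have hnear : nearVal spots i = some ((((i : Int) - (es : Int)).natAbs : Int)) := by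
            apply nearVal_eq_some spots i _ es hmemes rfl
            intro z' hl1 hl2
            rcases Nat.lt_or_ge i z' with h | h
            · have := habove z' hl1 hl2 h
              omega
            · have := hbelow z' hl2 (by omega)
              omega
          refine ⟨dists.set i (some ((((i : Int) - (es : Int)).natAbs : Int))), es, rfl,
            by simp [hlen], ?_, ?_, hes, hz, by omega, ?_⟩
          · intro k hk
            rw [List.getElem?_set_ne (by omega)]
            exact hlow k (by omega)
          · intro k h1 h2
            by_cases hki : k = i
            · subst hki
              rw [List.getElem?_set_self (by omega), hnear]
            · rw [List.getElem?_set_ne (fun hc' => hki hc'.symm)]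
              exact hhigh k (by omega) h2
          · intro k h1 h2
            by_cases hki : k = i
            · subst hki; exact Bool.eq_false_iff.mpr hzi
            · exact hgap k (by omega) h2
        · rw [if_neg hc]
          have hnear : nearVal spots i = some ((((i : Int) - (j : Int)).natAbs : Int)) := by
            apply nearVal_eq_some spots i _ j hjmem rfl
            intro z' hl1 hl2
            rcases Nat.lt_or_ge i z' with h | h
            · have := habove z' hl1 hl2 h
              omega
            · have := hbelow z' hl2 (by omega)
              omega
          refine ⟨dists, es, rfl, hlen, fun k hk => hlow k (by omega), ?_, hes, hz, by omega, ?_⟩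
          · intro k h1 h2
            by_cases hki : k = i
            · subst hki
              rw [hlow k le_rfl, hsomev, hnear]
              simp only [Option.some.injEq]
              omega
            · exact hhigh k (by omega) h2
          · intro k h1 h2
            by_cases hki : k = i
            · subst hki; exact Bool.eq_false_iff.mpr hzi
            · exact hgap k (by omega) h2

theorem bwd_inv (spots : List String) (i : Nat) :
    ∀ (dists : List (Option Int)) (es : Nat),
      es < spots.length → isZero spots es = true → i < es →
      (∀ k, i < k → k < es → isZero spots k = false) →
      dists.length = spots.length →
      (∀ k, k ≤ i → dists[k]? = some (fwdVal spots k)) →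
      (∀ k, i < k → k < spots.length → dists[k]? = some (nearVal spots k)) →
      ((PySem.List.pyRange (i : Int) (-1) (-1)).foldl (bwdStep spots) (dists, (es : Int))).1.length = spots.length ∧
      ∀ k, k < spots.length →
        ((PySem.List.pyRange (i : Int) (-1) (-1)).foldl (bwdStep spots) (dists, (es : Int))).1[k]? = some (nearVal spots k) := by
  induction i with
  | zero =>
      intro dists es h1 h2 h3 h4 h5 h6 h7
      obtain ⟨dists', es', heq, hlen', _, hge', _⟩ :=
        bwd_step_inv spots 0 dists es h1 h2 h3 h4 h5 h6 h7
      simp only [Nat.cast_zero] at heq ⊢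
      rw [PySem.List.pyRange_neg_one_cons (by omega), List.foldl_cons,
        show ((0 : Int) - 1) = -1 by omega, PySem.List.pyRange_neg_one_eq_nil (by omega),
        List.foldl_nil, heq]
      exact ⟨hlen', fun k hk => hge' k (by omega) hk⟩
  | succ i ih =>
      intro dists es h1 h2 h3 h4 h5 h6 h7
      obtain ⟨dists', es', heq, hlen', hlt', hge', he1, he2, he3, he4⟩ :=
        bwd_step_inv spots (i+1) dists es h1 h2 h3 h4 h5 h6 h7
      rw [PySem.List.pyRange_neg_one_cons (by omega), List.foldl_cons,
        show (((i+1 : Nat) : Int) - 1) = (i : Int) by push_cast; ring, heq]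
      exact ih dists' es' he1 he2 (by omega) (fun k hk1 hk2 => he4 k (by omega) hk2) hlen'
        (fun k hk => hlt' k (by omega)) (fun k hk1 hk2 => hge' k (by omega) hk2)

-- at or above the overall last zero the forward value is already the nearest distance
theorem fwdVal_eq_nearVal_ge (spots : List String) (z k : Nat)
    (hlz : lastZ spots spots.length = some z) (hzk : z ≤ k) (hk : k < spots.length) :
    nearVal spots k = fwdVal spots k := by
  obtain ⟨hzz, hzlen, hgapz⟩ := lastZ_props spots spots.length z hlz
  have hl1 : lastZ spots (k+1) = some z :=
    lastZ_intro spots (k+1) z hzz (by omega) (fun t ht1 ht2 => hgapz t ht1 (by omega))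
  have hnear : nearVal spots k = some ((((k : Int) - (z : Int)).natAbs : Int)) := by
    apply nearVal_eq_some spots k _ z ((mem_zerosN spots z).mpr ⟨hzlen, hzz⟩) rfl
    intro z' hl1' hl2'
    have hz'z : z' ≤ z := by
      by_contra hcon
      have := hgapz z' (by omega) hl1'
      rw [this] at hl2'; cases hl2'
    omega
  have hfwd : fwdVal spots k = some ((k : Int) - (z : Int)) := by
    simp [fwdVal, hl1]
  rw [hfwd, hnear]
  exact Option.some_inj.mpr (by omega)

theorem A_char (spots : List String) :
    (find_distances_to_empty_spots spots).length = spots.length ∧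
    ∀ k, k < spots.length → (find_distances_to_empty_spots spots)[k]? = some (nearVal spots k) := by
  have hA : find_distances_to_empty_spots spots
      = ((PySem.List.pyRange
            (((PySem.List.pyRange 0 (spots.length : Int) 1).foldl (fwdStep spots)
                (List.replicate spots.length none, -1)).2 - 1) (-1) (-1)).foldl (bwdStep spots)
          ((PySem.List.pyRange 0 (spots.length : Int) 1).foldl (fwdStep spots)
            (List.replicate spots.length none, -1))).1 := rfl
  have hr : PySem.List.pyRange 0 (spots.length : Int) 1
      = (List.range spots.length).map (Nat.cast : Nat → Int) := by
    rw [PySem.List.pyRange_one]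
    simp only [Int.sub_zero, Int.toNat_natCast, zero_add]
  obtain ⟨dists, heq, hlen, hlt, _⟩ := fwd_inv spots spots.length le_rfl
  rw [hA, hr, List.foldl_map, heq]
  cases hlz : lastZ spots spots.length with
  | none =>
      simp only
      rw [show ((-1 : Int) - 1) = -2 by omega, PySem.List.pyRange_neg_one_eq_nil (by omega),
        List.foldl_nil]
      refine ⟨hlen, fun k hk => ?_⟩
      have hzn : zerosN spots = [] := by
        apply List.filter_eq_nil_iff.mpr
        intro a ha
        rw [List.mem_range] at ha
        simp [lastZ_none spots spots.length hlz a ha]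
      rw [hlt k hk, nearVal_none spots k hzn]
      have hfn : fwdVal spots k = none := by
        have h0 : lastZ spots (k+1) = none := by
          cases hl : lastZ spots (k+1) with
          | none => rfl
          | some j =>
              obtain ⟨hjz, hjk, _⟩ := lastZ_props spots (k+1) j hl
              have := lastZ_none spots spots.length hlz j (by omega)
              rw [this] at hjz; cases hjz
        simp [fwdVal, h0]
      rw [hfn]
  | some z =>
      simp only
      obtain ⟨hzz, hzlen, _⟩ := lastZ_props spots spots.length z hlz
      by_cases hz0 : z = 0
      · subst hz0
        rw [show (((0 : Nat) : Int) - 1) = -1 by simp, PySem.List.pyRange_neg_one_eq_nil (by omega),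
          List.foldl_nil]
        refine ⟨hlen, fun k hk => ?_⟩
        rw [hlt k hk, fwdVal_eq_nearVal_ge spots 0 k hlz (by omega) hk]
      · rw [show (((z : Nat) : Int) - 1) = ((z - 1 : Nat) : Int) by push_cast [Nat.cast_sub (by omega : 1 ≤ z)]; ring]
        exact bwd_inv spots (z-1) dists z hzlen hzz (by omega)
          (fun k h1 h2 => by omega) hlen
          (fun k hk => hlt k (by omega))
          (fun k h1 h2 => by
            rw [hlt k h2, fwdVal_eq_nearVal_ge spots z k hlz (by omega) h2])

theorem mem_zerosI (spots : List String) (y : Int) :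
    y ∈ (PySem.List.enumerate spots).filterMap (fun p => if p.2 == "0" then some p.1 else none)
      ↔ ∃ z : Nat, z ∈ zerosN spots ∧ y = (z : Int) := by
  constructor
  · intro hy
    obtain ⟨p, hp, hpz⟩ := List.mem_filterMap.mp hy
    obtain ⟨k', hk', rfl⟩ := (PySem.List.mem_enumerate_iff _ _ _).mp hp
    by_cases hcc : (spots[k'] == "0") = true
    · rw [if_pos hcc] at hpz
      refine ⟨k', (mem_zerosN spots k').mpr ⟨hk', ?_⟩, ?_⟩
      · unfold isZero
        rw [List.getElem?_eq_getElem hk']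
        simpa using hcc
      · simpa using hpz.symm
    · rw [if_neg hcc] at hpz
      cases hpz
  · rintro ⟨z, hz, rfl⟩
    obtain ⟨hzlen, hzz⟩ := (mem_zerosN spots z).mp hz
    apply List.mem_filterMap.mpr
    refine ⟨((0 : Int) + (z : Nat), spots[z]), ?_, ?_⟩
    · exact (PySem.List.mem_enumerate_iff _ _ _).mpr ⟨z, hzlen, rfl⟩
    · have hcc : (spots[z] == "0") = true := by
        unfold isZero at hzz
        rw [List.getElem?_eq_getElem hzlen] at hzz
        simpa using hzz
      rw [if_pos hcc]
      simp
  
theorem B_char (spots : List String) :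
    (find_distances_to_empty_spots_alt spots).length = spots.length ∧
    ∀ k, k < spots.length → (find_distances_to_empty_spots_alt spots)[k]? = some (nearVal spots k) := by
  have hB : find_distances_to_empty_spots_alt spots
      = (if ((PySem.List.enumerate spots).filterMap (fun p => if p.2 == "0" then some p.1 else none)).isEmpty
          then List.replicate spots.length none
          else (PySem.List.pyRange 0 (spots.length : Int) 1).map
            (fun i => PySem.List.min?
              (((PySem.List.enumerate spots).filterMap (fun p => if p.2 == "0" then some p.1 else none)).map
                (fun z => ((i - z).natAbs : Int))) (fun x => x))) := rfl
  rw [hB]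
  by_cases hempty : zerosN spots = []
  · have hIE : (((PySem.List.enumerate spots).filterMap (fun p => if p.2 == "0" then some p.1 else none)).isEmpty) = true := by
      rw [List.isEmpty_iff, List.eq_nil_iff_forall_not_mem]
      intro y hy
      obtain ⟨z, hz, _⟩ := (mem_zerosI spots y).mp hy
      rw [hempty] at hz
      cases hz
    rw [hIE]
    simp only [if_true]
    refine ⟨by simp, fun k hk => ?_⟩
    rw [nearVal_none spots k hempty]
    simp [hk]
  · have hIE : (((PySem.List.enumerate spots).filterMap (fun p => if p.2 == "0" then some p.1 else none)).isEmpty) = false := by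
      rw [List.isEmpty_eq_false_iff]
      intro hnil
      obtain ⟨z, hz⟩ := List.exists_mem_of_ne_nil _ hempty
      have := (mem_zerosI spots (z : Int)).mpr ⟨z, hz, rfl⟩
      rw [hnil] at this
      cases this
    rw [hIE]
    simp only [Bool.false_eq_true, if_false]
    constructor
    · rw [List.length_map, PySem.List.length_pyRange_one]
      simp
    · intro k hk
      rw [PySem.List.getElem?_map_pyRange_zero _ spots.length k hk]
      refine Option.some_inj.mpr ?_
      unfold nearVal
      apply min?_congr_mem
      intro x
      constructor
      · intro hx
        obtain ⟨zI, hzI, rfl⟩ := List.mem_map.mp hx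
        obtain ⟨z, hz, rfl⟩ := (mem_zerosI spots zI).mp hzI
        exact List.mem_map.mpr ⟨z, hz, rfl⟩
      · intro hx
        obtain ⟨z, hz, rfl⟩ := List.mem_map.mp hx
        exact List.mem_map.mpr ⟨(z : Int), (mem_zerosI spots (z : Int)).mpr ⟨z, hz, rfl⟩, rfl⟩

-- ===== VERDICT (by name: the statement is the Claim_ definition above) =====
theorem find_distances_to_empty_spots_spec : Claim_equal_find_distances_to_empty_spots := by
  intro spots _
  unfold Spec_find_distances_to_empty_spots
  obtain ⟨hal, ha⟩ := A_char spots
  obtain ⟨hbl, hb⟩ := B_char spots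
  apply List.ext_getElem?
  intro i
  by_cases hi : i < spots.length
  · rw [ha i hi, hb i hi]
  · rw [List.getElem?_eq_none (by omega), List.getElem?_eq_none (by omega)]
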